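-- pv_equiv track=rewrite | github.com/ChrisDavison/advent-of-code | 2023/day13.py | column_mirrors
-- ===== SOURCE A (Python) =====
-- def is_vmirror(line, i):
--     l, r = line[:i], line[i:]
--     n = min(len(l), len(r))
--     return l[-n:][::-1] == r[:n]
--
-- def column_mirrors(paragraph):
--     def f(line):
--         possible = set()
--         for i in range(1, len(line)):
--             N = len(line)
--             w = N - i
--             if is_vmirror(line, i):
--                 possible.add(i)
--         return possible
--
--     possible = f(paragraph[0])
--     for i, line in enumerate(paragraph[1:]):
--         if not possible:
--             break
--         possible &= f(line)
--     return possible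
-- ===== SOURCE B (Python) =====
-- def _mirror_at(line, i):
--     # even-palindrome check centred at gap i, reaching min(i, len(line)-i) steps
--     k = min(i, len(line) - i)
--     return all(line[i - 1 - j] == line[i + j] for j in range(k))
--
--
-- def column_mirrors(paragraph):
--     # candidate-major: test each candidate column against every line at once,
--     # comparing characters pairwise instead of building/reversing slices per line
--     first = paragraph[0]
--     result = set()
--     for i in range(1, len(first)):
--         if all(i < len(line) and _mirror_at(line, i) for line in paragraph):
--             result.add(i)
--     return result
-- ===== Notes on version B (the rewrite author's own statement) =====
-- stated objective: alternative
-- what changed: Line-major slice-build-reverse-and-intersect-sets is replaced by a candidate-major scan: each mirror column of the first row is tested against all rows at once by pairwise character comparison, with no slicing, no reversal and no set intersection.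
import Mathlib
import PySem

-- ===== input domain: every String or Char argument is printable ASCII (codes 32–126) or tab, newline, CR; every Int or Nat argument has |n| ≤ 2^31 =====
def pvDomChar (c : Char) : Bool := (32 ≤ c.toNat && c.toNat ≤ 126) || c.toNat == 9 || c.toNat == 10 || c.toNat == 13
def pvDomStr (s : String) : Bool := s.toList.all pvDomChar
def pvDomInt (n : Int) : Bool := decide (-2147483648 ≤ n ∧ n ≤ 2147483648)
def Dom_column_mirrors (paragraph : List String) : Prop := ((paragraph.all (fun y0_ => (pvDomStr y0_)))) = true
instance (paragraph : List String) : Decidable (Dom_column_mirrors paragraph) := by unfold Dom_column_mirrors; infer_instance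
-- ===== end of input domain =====

-- B replaces the line-major slice/reverse/set-intersection scan by a candidate-major
-- pairwise-character scan (alternative decomposition, not claimed faster).

-- ===== PORT A =====
-- is_vmirror: l, r = line[:i], line[i:]; n = min(len(l), len(r)); l[-n:][::-1] == r[:n]
-- ([::-1] ported through slice? with step -1, exact by PySem.List.slice?_none_none_neg_one;
--  the .getD [] branch is never taken since the step is nonzero)
def pvIsVmirror (line : List Char) (i : Int) : Bool :=
  let l := PySem.List.slice line none (some i)
  let r := PySem.List.slice line (some i) none
  let n : Int := min (l.length : Int) (r.length : Int)
  ((PySem.List.slice? (PySem.List.slice l (some (-n)) none) none none (-1)).getD [])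
    == PySem.List.slice r none (some n)

-- inner f(line): for i in range(1, len(line)): if is_vmirror(line, i): possible.add(i)
-- (the bindings N and w in the Python are dead code and are elided)
def pvF (line : List Char) : PySem.Set Int :=
  (PySem.List.pyRange 1 (line.length : Int) 1).foldl
    (fun possible i => if pvIsVmirror line i then PySem.Set.add possible i else possible)
    PySem.Set.empty

-- for i, line in enumerate(paragraph[1:]): if not possible: break; possible &= f(line)
def pvALoop (rest : List (List Char)) (possible : PySem.Set Int) : PySem.Set Int :=
  match rest with
  | [] => possible
  | line :: rest' =>
    if possible.isEmpty then possible
    else pvALoop rest' (PySem.Set.inter possible (pvF line))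

-- Python A raises IndexError on paragraph == [] (paragraph[0]); Pre_ excludes that input
def column_mirrors (paragraph : List String) : List Int :=
  match paragraph with
  | [] => []
  | p0 :: rest => pvALoop (rest.map String.toList) (pvF p0.toList)

-- ===== PORT B =====
-- _mirror_at(line, i): all(line[i-1-j] == line[i+j] for j in range(min(i, len(line)-i)))
-- (indices are in range for every j the range produces when 1 ≤ i < len(line); pyGetD is exact there)
def pvMirrorAt (line : List Char) (i : Int) : Bool :=
  let k : Int := min i ((line.length : Int) - i)
  (PySem.List.pyRange 0 k 1).all (fun j =>
    PySem.List.pyGetD line (i - 1 - j) ' ' == PySem.List.pyGetD line (i + j) ' ')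

-- Python B raises IndexError on paragraph == [] too; Pre_ excludes that input
def column_mirrors_alt (paragraph : List String) : List Int :=
  match paragraph with
  | [] => []
  | first :: rest =>
    (PySem.List.pyRange 1 (first.toList.length : Int) 1).foldl
      (fun result i =>
        if (first :: rest).all (fun line =>
            decide (i < (line.toList.length : Int)) && pvMirrorAt line.toList i)
        then PySem.Set.add result i else result)
      PySem.Set.empty

-- ===== PRECONDITION & SPEC =====
-- Pre_ excludes only the empty paragraph list, on which A raises IndexError (paragraph[0])
def Pre_column_mirrors (paragraph : List String) : Prop := paragraph ≠ []
instance (paragraph : List String) : Decidable (Pre_column_mirrors paragraph) := by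
  unfold Pre_column_mirrors; infer_instance

def pvWitness_column_mirrors : List String := ["#..#", "#..#"]

def Spec_column_mirrors (paragraph : List String) (out : List Int) : Prop :=
  out = column_mirrors_alt paragraph
instance (paragraph : List String) (out : List Int) : Decidable (Spec_column_mirrors paragraph out) := by
  unfold Spec_column_mirrors; infer_instance

-- ===== CLAIM (what is proved, stated in full; the proofs are below) =====
def Claim_equal_column_mirrors : Prop :=
  ∀ (paragraph : List String), Dom_column_mirrors paragraph →
    Pre_column_mirrors paragraph →
    Spec_column_mirrors paragraph (column_mirrors paragraph)

-- ===== LEMMAS AND PROOFS =====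

-- a fold that Set.adds fresh elements of a Nodup list is append-of-filter
lemma pvFoldlAddIf (p : Int → Bool) :
    ∀ (xs acc : List Int), (∀ x ∈ xs, x ∉ acc) → xs.Nodup →
      xs.foldl (fun s i => if p i then PySem.Set.add s i else s) acc = acc ++ xs.filter p
  | [], acc, _, _ => by simp
  | x :: xs, acc, h, hnd => by
    simp only [List.foldl_cons, List.filter_cons]
    by_cases hp : p x
    · rw [if_pos hp, PySem.Set.add_of_not_mem (h x (by simp)),
        pvFoldlAddIf p xs (acc ++ [x])
          (by
            intro y hy
            simp only [List.mem_append, List.mem_singleton, not_or]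
            exact ⟨h y (List.mem_cons_of_mem _ hy), fun hyx => (List.nodup_cons.mp hnd).1 (hyx ▸ hy)⟩)
          hnd.of_cons]
      simp [hp]
    · rw [if_neg hp, pvFoldlAddIf p xs acc (fun y hy => h y (List.mem_cons_of_mem _ hy)) hnd.of_cons]
      simp [hp]

lemma pvF_eq (cs : List Char) :
    pvF cs = (PySem.List.pyRange 1 (cs.length : Int) 1).filter (fun i => pvIsVmirror cs i) := by
  unfold pvF
  rw [pvFoldlAddIf _ _ _ (by simp [PySem.Set.empty]) (PySem.List.nodup_pyRange_one _ _)]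
  simp [PySem.Set.empty]

lemma pvContains_pvF (cs : List Char) (i : Int) :
    PySem.Set.contains (pvF cs) i = true ↔
      (1 ≤ i ∧ i < (cs.length : Int) ∧ pvIsVmirror cs i = true) := by
  rw [PySem.Set.contains_iff, pvF_eq]
  simp [List.mem_filter, PySem.List.mem_pyRange_one, and_assoc]

lemma pvALoop_eq : ∀ (rest : List (List Char)) (poss : PySem.Set Int),
    pvALoop rest poss =
      poss.filter (fun i => rest.all (fun l => PySem.Set.contains (pvF l) i))
  | [], poss => by simp [pvALoop]
  | line :: rest', poss => by
    unfold pvALoop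
    by_cases h : poss.isEmpty
    · rw [if_pos h]
      rw [List.isEmpty_iff.mp h]
      simp
    · rw [if_neg h, pvALoop_eq rest']
      show List.filter _ (List.filter (fun x => (pvF line).contains x) poss) = _
      rw [List.filter_filter]
      apply List.filter_congr
      intro x _
      simp only [List.all_cons]
      exact Bool.and_comm _ _

-- the slice/reverse equality and the pairwise-character scan test the same thing
lemma pvListEq_iff (cs : List Char) (a m : Nat) (hma : m ≤ a) (hab : a + m ≤ cs.length) :
    (((cs.take a).drop (a - m)).reverse = (cs.drop a).take m) ↔
      (∀ j : Nat, j < m → cs.getD (a - 1 - j) ' ' = cs.getD (a + j) ' ') := by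
  have hlen : ((cs.take a).drop (a - m)).length = m := by
    rw [List.length_drop, List.length_take]; omega
  have key1 : ∀ t : Nat, (((cs.take a).drop (a - m)).reverse)[t]? =
      (if t < m then cs[a - 1 - t]? else none) := by
    intro t
    by_cases ht : t < m
    · rw [List.getElem?_reverse (by rw [hlen]; exact ht), hlen, List.getElem?_drop,
        List.getElem?_take, if_pos (by omega), if_pos ht,
        show a - m + (m - 1 - t) = a - 1 - t from by omega]
    · rw [if_neg ht, List.getElem?_eq_none (by rw [List.length_reverse, hlen]; omega)]
  have key2 : ∀ t : Nat, ((cs.drop a).take m)[t]? =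
      (if t < m then cs[a + t]? else none) := by
    intro t
    by_cases ht : t < m
    · rw [if_pos ht, List.getElem?_take, if_pos ht, List.getElem?_drop]
    · rw [if_neg ht, List.getElem?_take, if_neg ht]
  constructor
  · intro h j hj
    have h1 := key1 j
    rw [h, key2 j, if_pos hj, if_pos hj] at h1
    rw [List.getD_eq_getElem?_getD, List.getD_eq_getElem?_getD, h1]
  · intro h
    apply List.ext_getElem?
    intro t
    rw [key1 t, key2 t]
    by_cases ht : t < m
    · rw [if_pos ht, if_pos ht]
      have hh := h t ht
      rw [List.getD_eq_getElem?_getD, List.getD_eq_getElem?_getD,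
        List.getElem?_eq_getElem (show a - 1 - t < cs.length by omega),
        List.getElem?_eq_getElem (show a + t < cs.length by omega)] at hh
      rw [List.getElem?_eq_getElem (show a - 1 - t < cs.length by omega),
        List.getElem?_eq_getElem (show a + t < cs.length by omega)]
      simpa using hh
    · rw [if_neg ht, if_neg ht]

lemma pvIsVmirror_eq (cs : List Char) (a : Nat) (h1 : 1 ≤ a) (h2 : a < cs.length) :
    pvIsVmirror cs (a : Int) = pvMirrorAt cs (a : Int) := by
  set m := min a (cs.length - a) with hmdef
  have hma : m ≤ a := by omega
  have hab : a + m ≤ cs.length := by omega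
  have hm0 : 0 < m := by omega
  simp only [pvIsVmirror, pvMirrorAt]
  rw [PySem.List.slice_to_natCast, PySem.List.slice_from_natCast]
  have hta : (cs.take a).length = a := by rw [List.length_take]; omega
  have hda : (cs.drop a).length = cs.length - a := by rw [List.length_drop]
  rw [hta, hda]
  rw [show min ((a : Nat) : Int) (((cs.length - a : Nat) : Int)) = ((m : Nat) : Int) from by omega]
  rw [show min ((a : Nat) : Int) ((cs.length : Int) - ((a : Nat) : Int)) = ((m : Nat) : Int) from by omega]
  rw [PySem.List.slice_from_neg_natCast _ m hm0, PySem.List.slice?_none_none_neg_one,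
    Option.getD_some, PySem.List.slice_to_natCast, hta, PySem.List.pyRange_zero_nat]
  rw [Bool.eq_iff_iff, beq_iff_eq, pvListEq_iff cs a m hma hab, List.all_map]
  simp only [List.all_eq_true, List.mem_range, Function.comp_apply]
  refine forall_congr' fun j => imp_congr_right fun hj => ?_
  rw [show ((a : Nat) : Int) - 1 - ((j : Nat) : Int) = (((a - 1 - j : Nat)) : Int) from by omega,
    show ((a : Nat) : Int) + ((j : Nat) : Int) = (((a + j : Nat)) : Int) from by omega,
    PySem.List.pyGetD_natCast, PySem.List.pyGetD_natCast, beq_iff_eq]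

lemma pvContains_eq (cs : List Char) (a : Nat) (h1 : 1 ≤ a) :
    PySem.Set.contains (pvF cs) (a : Int) =
      (decide ((a : Int) < (cs.length : Int)) && pvMirrorAt cs (a : Int)) := by
  by_cases h : a < cs.length
  · rw [Bool.eq_iff_iff, pvContains_pvF]
    have hc : ((a : Int) < (cs.length : Int)) := by exact_mod_cast h
    simp [hc, pvIsVmirror_eq cs a h1 h]
    omega
  · rw [Bool.eq_iff_iff, pvContains_pvF]
    have hc : ¬ ((a : Int) < (cs.length : Int)) := by exact_mod_cast h
    simp [hc]

-- ===== VERDICT (by name: the statement is the Claim_ definition above) =====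
theorem column_mirrors_spec : Claim_equal_column_mirrors := by
  intro paragraph _ hpre
  unfold Spec_column_mirrors
  match paragraph with
  | [] => exact absurd rfl hpre
  | first :: rest =>
    show column_mirrors (first :: rest) = column_mirrors_alt (first :: rest)
    have hB : column_mirrors_alt (first :: rest) =
        (PySem.List.pyRange 1 (first.toList.length : Int) 1).filter
          (fun i => (first :: rest).all (fun line =>
            decide (i < (line.toList.length : Int)) && pvMirrorAt line.toList i)) := by
      show (PySem.List.pyRange 1 (first.toList.length : Int) 1).foldl _ _ = _
      rw [pvFoldlAddIf _ _ _ (by simp [PySem.Set.empty]) (PySem.List.nodup_pyRange_one _ _)]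
      simp [PySem.Set.empty]
    have hA : column_mirrors (first :: rest) =
        ((PySem.List.pyRange 1 (first.toList.length : Int) 1).filter
          (fun i => pvIsVmirror first.toList i)).filter
          (fun i => (rest.map String.toList).all (fun l => PySem.Set.contains (pvF l) i)) := by
      show pvALoop (rest.map String.toList) (pvF first.toList) = _
      rw [pvALoop_eq, pvF_eq]
    rw [hA, hB, List.filter_filter]
    apply List.filter_congr
    intro i hi
    have hr := PySem.List.mem_pyRange_one.mp hi
    lift i to ℕ using (by omega)
    have h1 : 1 ≤ i := by exact_mod_cast hr.1
    have h2 : i < first.toList.length := by exact_mod_cast hr.2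
    have hc : ((i : Int) < (first.toList.length : Int)) := by exact_mod_cast h2
    have hfirst : pvIsVmirror first.toList (i : Int) =
        (decide ((i : Int) < (first.toList.length : Int)) && pvMirrorAt first.toList (i : Int)) := by
      rw [pvIsVmirror_eq first.toList i h1 h2, decide_eq_true hc, Bool.true_and]
    have hfun : ∀ (l : String), PySem.Set.contains (pvF l.toList) (i : Int) =
        (decide ((i : Int) < (l.toList.length : Int)) && pvMirrorAt l.toList (i : Int)) :=
      fun l => pvContains_eq l.toList i h1
    simp only [List.all_cons, List.all_map]
    rw [hfirst, Bool.and_comm]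
    congr 1
    exact List.all_congr rfl fun l => by
      simp only [Function.comp_apply]; exact hfun l
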